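-- pv_equiv track=rewrite | github.com/MingduDing/A-plan | leetcode/数组Array/exam605.py | place_flowers_2
-- ===== SOURCE A (Python) =====
-- def place_flowers_2(flowerbed, n):
--     """
--     法2：利用一个长度为3的滑窗，输入做padding
--     :param flowerbed:
--     :param n:
--     :return:
--     """
--     flowerbed = [0] + flowerbed + [0]                              # 左右各增加一个空位置
--     for i in range(1, len(flowerbed)-1):                           # 遍历出两端之外的位置
--         if flowerbed[i-1] == flowerbed[i] == flowerbed[i+1] == 0:  # 遇到连续三个空位置
--             flowerbed[i] += 1                                      # 放一盆花
--             n -= 1                                                 # 花数减1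
--         if n <= 0:                                                 # 如果花用完了
--             return True                                            # 返回True
--     return False                                                   # 花没用完，返回False
-- ===== SOURCE B (Python) =====
-- def place_flowers_2(flowerbed, n):
--     if not flowerbed:
--         return False
--     placed = 0
--     count = 1  # virtual empty plot before the bed
--     for x in flowerbed:
--         if x == 0:
--             count += 1
--         else:
--             placed += max(count - 1, 0) // 2
--             count = 0
--     placed += count // 2  # trailing run (virtual empty plot after the bed)
--     return placed >= n
-- ===== Notes on version B (the rewrite author's own statement) =====
-- stated objective: alternative
-- what changed: Replaces A's pad-copy-and-mutate greedy sweep (build [0]+bed+[0], plant into the list, early-return) with a single read-only run-length scan that sums (run-1)//2 over maximal zero runs and compares the total to n.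
import Mathlib
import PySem

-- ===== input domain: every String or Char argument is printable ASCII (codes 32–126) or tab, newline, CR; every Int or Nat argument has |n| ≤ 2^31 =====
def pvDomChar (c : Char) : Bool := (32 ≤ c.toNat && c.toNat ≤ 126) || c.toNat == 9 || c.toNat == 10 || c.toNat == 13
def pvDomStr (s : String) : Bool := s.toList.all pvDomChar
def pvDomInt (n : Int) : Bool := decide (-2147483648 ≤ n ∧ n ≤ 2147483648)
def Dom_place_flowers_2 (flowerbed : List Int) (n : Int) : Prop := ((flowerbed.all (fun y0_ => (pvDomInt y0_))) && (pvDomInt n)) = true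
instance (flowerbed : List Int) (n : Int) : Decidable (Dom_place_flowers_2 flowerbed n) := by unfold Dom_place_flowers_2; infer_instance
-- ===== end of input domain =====

-- B replaces A's pad-and-mutate greedy sweep by a single run-length scan over zero runs
-- (objective: alternative; same value on every input, including A's empty-bed corner).
-- A never mutates the caller's list (it pads into a fresh list); B reads only.

-- ===== PORT A =====
-- literal port of A's loop: index i over the padded bed, mutating the bed with `set`;
-- all indices touched are in range (1 ≤ i ≤ len-2), so `getD _ 0` is exact Python indexing here.
def pfALoop (bed : List Int) (n : Int) (i : Nat) : Nat → Bool
  | 0 => false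
  | fuel + 1 =>
    if bed.getD (i - 1) 0 = 0 ∧ bed.getD i 0 = 0 ∧ bed.getD (i + 1) 0 = 0 then
      let bed' := bed.set i (bed.getD i 0 + 1)
      let n' := n - 1
      if n' ≤ 0 then true else pfALoop bed' n' (i + 1) fuel
    else
      if n ≤ 0 then true else pfALoop bed n (i + 1) fuel

def place_flowers_2 (flowerbed : List Int) (n : Int) : Bool :=
  let bed := [0] ++ flowerbed ++ [0]
  pfALoop bed n 1 (bed.length - 2)

-- ===== PORT B =====
-- fold state (placed, count), exactly Source B's loop body
def pfBStep (pc : Int × Int) (x : Int) : Int × Int :=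
  if x = 0 then (pc.1, pc.2 + 1)
  else (pc.1 + PySem.Int.floordiv (max (pc.2 - 1) 0) 2, 0)

def place_flowers_2_alt (flowerbed : List Int) (n : Int) : Bool :=
  match flowerbed with
  | [] => false
  | _ =>
    let pc := flowerbed.foldl pfBStep (0, 1)
    let placed := pc.1 + PySem.Int.floordiv pc.2 2
    decide (placed ≥ n)

-- ===== PRECONDITION & SPEC =====
def Spec_place_flowers_2 (flowerbed : List Int) (n : Int) (out : Bool) : Prop := out = place_flowers_2_alt flowerbed n
instance (flowerbed : List Int) (n : Int) (out : Bool) : Decidable (Spec_place_flowers_2 flowerbed n out) := by unfold Spec_place_flowers_2; infer_instance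

-- ===== CLAIM (what is proved, stated in full; the proofs are below) =====
def Claim_equal_place_flowers_2 : Prop := ∀ (flowerbed : List Int) (n : Int), Dom_place_flowers_2 flowerbed n → Spec_place_flowers_2 flowerbed n (place_flowers_2 flowerbed n)

-- ===== LEMMAS AND PROOFS =====

-- pure reformulation of A's mutating sweep: `prev` is the current value at position i-1
def pfGo (prev : Int) (n : Int) : List Int → Bool
  | [] => false
  | x :: rest =>
    if prev = 0 ∧ x = 0 ∧ rest.headD 0 = 0 then
      if n - 1 ≤ 0 then true else pfGo 1 (n - 1) rest
    else
      if n ≤ 0 then true else pfGo x n rest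

-- total number of flowers A's greedy sweep plants
def pfPlanted (prev : Int) : List Int → Int
  | [] => 0
  | x :: rest =>
    if prev = 0 ∧ x = 0 ∧ rest.headD 0 = 0 then 1 + pfPlanted 1 rest
    else pfPlanted x rest

theorem pfPlanted_nonneg (xs : List Int) : ∀ (prev : Int), 0 ≤ pfPlanted prev xs := by
  induction xs with
  | nil => intro prev; simp [pfPlanted]
  | cons x rest ih =>
    intro prev
    simp only [pfPlanted]
    split
    · have := ih 1; omega
    · exact ih x

theorem getD_append_length_add (front ys : List Int) (k : Nat) (d : Int) :
    (front ++ ys).getD (front.length + k) d = ys.getD k d := by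
  induction front with
  | nil => simp
  | cons a front ih => simpa [Nat.succ_add] using ih

theorem set_append_length (front ys : List Int) (v : Int) :
    (front ++ ys).set front.length v = front ++ ys.set 0 v := by
  induction front with
  | nil => simp
  | cons a front ih => simp [List.set, ih]

theorem pfALoop_eq_go (xs : List Int) : ∀ (front : List Int) (prev n : Int),
    pfALoop (front ++ prev :: (xs ++ [0])) n (front.length + 1) xs.length = pfGo prev n xs := by
  induction xs with
  | nil => intro front prev n; simp [pfALoop, pfGo]
  | cons x rest ih =>
    intro front prev n
    have h0 : (front ++ prev :: (x :: rest ++ [0])).getD (front.length + 1 - 1) 0 = prev := by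
      simpa using getD_append_length_add front (prev :: (x :: rest ++ [0])) 0 0
    have h1 : (front ++ prev :: (x :: rest ++ [0])).getD (front.length + 1) 0 = x := by
      simpa using getD_append_length_add front (prev :: (x :: rest ++ [0])) 1 0
    have h2 : (front ++ prev :: (x :: rest ++ [0])).getD (front.length + 1 + 1) 0 = rest.headD 0 := by
      have := getD_append_length_add front (prev :: (x :: rest ++ [0])) 2 0
      cases rest <;> simpa [Nat.add_assoc] using this
    have hset : (front ++ prev :: (x :: rest ++ [0])).set (front.length + 1) (x + 1)
        = (front ++ [prev]) ++ (x + 1) :: (rest ++ [0]) := by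
      have := set_append_length (front ++ [prev]) (x :: (rest ++ [0])) (x + 1)
      simpa [List.set, List.append_assoc] using this
    show pfALoop _ n (front.length + 1) (rest.length + 1) = _
    rw [pfALoop]
    simp only [h0, h1, h2, pfGo]
    split
    · rename_i hcond
      rw [hset]
      split
      · rfl
      · have hx : x = 0 := hcond.2.1
        have := ih (front ++ [prev]) (x + 1) (n - 1)
        simp only [List.length_append, List.length_cons, List.length_nil] at this ⊢
        simpa [List.append_assoc, hx] using this
    · split
      · rfl
      · have := ih (front ++ [prev]) x n
        simp only [List.length_append, List.length_cons, List.length_nil] at this ⊢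
        simpa [List.append_assoc] using this

theorem place_flowers_2_eq_go (flowerbed : List Int) (n : Int) :
    place_flowers_2 flowerbed n = pfGo 0 n flowerbed := by
  have := pfALoop_eq_go flowerbed [] 0 n
  simpa [place_flowers_2] using this

theorem pfGo_eq_planted (xs : List Int) : ∀ (prev n : Int),
    pfGo prev n xs = (!xs.isEmpty && decide (n ≤ pfPlanted prev xs)) := by
  induction xs with
  | nil => intro prev n; simp [pfGo]
  | cons x rest ih =>
    intro prev n
    simp only [pfGo, pfPlanted, List.isEmpty_cons, Bool.not_false, Bool.true_and]
    by_cases hcond : prev = 0 ∧ x = 0 ∧ rest.headD 0 = 0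
    · simp only [if_pos hcond]
      by_cases hn : n - 1 ≤ 0
      · rw [if_pos hn]
        have := pfPlanted_nonneg rest 1
        symm
        rw [decide_eq_true_eq]
        omega
      · rw [if_neg hn, ih 1 (n - 1)]
        cases rest with
        | nil =>
          simp only [pfPlanted, List.isEmpty_nil, Bool.not_true, Bool.false_and]
          symm
          rw [decide_eq_false_iff_not]
          omega
        | cons y r =>
          simp only [List.isEmpty_cons, Bool.not_false, Bool.true_and]
          rw [decide_eq_decide]
          omega
    · simp only [if_neg hcond]
      by_cases hn : n ≤ 0
      · rw [if_pos hn]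
        have := pfPlanted_nonneg rest x
        symm
        rw [decide_eq_true_eq]
        omega
      · rw [if_neg hn, ih x n]
        cases rest with
        | nil =>
          simp only [pfPlanted, List.isEmpty_nil, Bool.not_true, Bool.false_and]
          symm
          rw [decide_eq_false_iff_not]
          omega
        | cons y r =>
          simp only [List.isEmpty_cons, Bool.not_false, Bool.true_and]

-- step equations for pfPlanted
theorem pfPlanted_nil (prev : Int) : pfPlanted prev [] = 0 := rfl
theorem pfPlanted_cons (prev x : Int) (rest : List Int) :
    pfPlanted prev (x :: rest)
      = if prev = 0 ∧ x = 0 ∧ rest.headD 0 = 0 then 1 + pfPlanted 1 rest else pfPlanted x rest := rfl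

-- the run-length fold computes exactly what A's greedy sweep plants.
-- Invariant: c counts the zeros of the current run (plus the virtual pad at the start),
-- prev = 0 exactly when c is odd, and an even positive c forces the next plot to be empty.
theorem pfFold_eq_planted : ∀ (xs : List Int) (c prev : Int), 0 ≤ c →
    (prev = 0 ↔ c % 2 = 1) →
    (c % 2 = 0 ∧ 1 ≤ c → ∃ r, xs = 0 :: r) →
    ∀ p : Int,
    (xs.foldl pfBStep (p, c)).1 + PySem.Int.floordiv (xs.foldl pfBStep (p, c)).2 2
      = p + PySem.Int.floordiv c 2 + pfPlanted prev xs
  | [], c, prev, hc, hparity, hhead, p => by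
      simp [pfPlanted_nil]
  | x :: rest, c, prev, hc, hparity, hhead, p => by
      have e2 : PySem.Int.floordiv c 2 = c / 2 := PySem.Int.floordiv_eq_ediv_of_pos (by omega)
      by_cases hx : x = 0
      · subst hx
        by_cases hprev : prev = 0
        · -- c odd: in a run whose next plant is allowed
          subst hprev
          have hodd : c % 2 = 1 := hparity.mp rfl
          by_cases hnext : rest.headD 0 = 0
          · cases rest with
            | nil =>
              have step : (((0:Int) :: ([] : List Int)).foldl pfBStep (p, c)) = (p, c + 1) := by
                simp [pfBStep]
              rw [step]
              have hC : (0:Int) = 0 ∧ (0:Int) = 0 ∧ List.headD ([] : List Int) 0 = 0 :=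
                ⟨rfl, rfl, rfl⟩
              rw [pfPlanted_cons, if_pos hC, pfPlanted_nil]
              have e1 : PySem.Int.floordiv (c + 1) 2 = (c + 1) / 2 :=
                PySem.Int.floordiv_eq_ediv_of_pos (by omega)
              show p + PySem.Int.floordiv (c + 1) 2 = p + PySem.Int.floordiv c 2 + (1 + 0)
              rw [e1, e2]; omega
            | cons y r =>
              have hy : y = 0 := by simpa using hnext
              subst hy
              have step : (((0:Int) :: 0 :: r).foldl pfBStep (p, c))
                  = ((0 :: r).foldl pfBStep (p, c + 1)) := by
                simp [List.foldl_cons, pfBStep]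
              rw [step]
              have hrec := pfFold_eq_planted (0 :: r) (c + 1) 1 (by omega)
                (by constructor <;> intro h <;> omega)
                (fun _ => ⟨r, rfl⟩) p
              rw [hrec]
              have hC : (0:Int) = 0 ∧ (0:Int) = 0 ∧ List.headD ((0:Int) :: r) 0 = 0 :=
                ⟨rfl, rfl, rfl⟩
              conv_rhs => rw [pfPlanted_cons]
              rw [if_pos hC]
              have e1 : PySem.Int.floordiv (c + 1) 2 = (c + 1) / 2 :=
                PySem.Int.floordiv_eq_ediv_of_pos (by omega)
              rw [e1, e2]; omega
          · -- run ends at the next plot: take two fold steps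
            cases rest with
            | nil => simp at hnext
            | cons y r =>
              have hy : y ≠ 0 := by simpa using hnext
              have step : (((0:Int) :: y :: r).foldl pfBStep (p, c))
                  = (r.foldl pfBStep (p + PySem.Int.floordiv (max c 0) 2, 0)) := by
                simp [List.foldl_cons, pfBStep, hy]
              rw [step]
              have hrec := pfFold_eq_planted r 0 y (by omega)
                (by constructor <;> intro h <;> [exact absurd h hy; omega])
                (by intro h; exact absurd h.2 (by omega)) (p + PySem.Int.floordiv (max c 0) 2)
              rw [hrec]
              have h1 : ¬((0:Int) = 0 ∧ (0:Int) = 0 ∧ List.headD (y :: r) 0 = 0) := by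
                simp [hy]
              have h2 : ¬((0:Int) = 0 ∧ y = 0 ∧ List.headD r 0 = 0) := by simp [hy]
              conv_rhs => rw [pfPlanted_cons]
              rw [if_neg h1]
              conv_rhs => rw [pfPlanted_cons]
              rw [if_neg h2]
              have hmax : max c (0:Int) = c := by omega
              have e0 : PySem.Int.floordiv (0:Int) 2 = 0 / 2 :=
                PySem.Int.floordiv_eq_ediv_of_pos (by omega)
              rw [hmax, e0, e2]; omega
        · -- prev ≠ 0, c even: the zero just extends the run
          have heven : c % 2 = 0 := by
            rcases Int.emod_two_eq_zero_or_one c with h | h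
            · exact h
            · exact absurd (hparity.mpr h) hprev
          have step : (((0:Int) :: rest).foldl pfBStep (p, c))
              = (rest.foldl pfBStep (p, c + 1)) := by
            simp [List.foldl_cons, pfBStep]
          rw [step]
          have hrec := pfFold_eq_planted rest (c + 1) 0 (by omega)
            (by constructor <;> intro h <;> omega)
            (by intro h; exact absurd h.1 (by omega)) p
          rw [hrec]
          have h1 : ¬(prev = 0 ∧ (0:Int) = 0 ∧ List.headD rest 0 = 0) := fun h => hprev h.1
          conv_rhs => rw [pfPlanted_cons]
          rw [if_neg h1]
          have e1 : PySem.Int.floordiv (c + 1) 2 = (c + 1) / 2 :=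
            PySem.Int.floordiv_eq_ediv_of_pos (by omega)
          rw [e1, e2]; omega
      · -- x ≠ 0: the run (if any) is closed; c is odd or zero
        have hcz : c % 2 = 1 ∨ c = 0 := by
          rcases Int.emod_two_eq_zero_or_one c with h | h
          · right
            by_contra hne
            obtain ⟨r, hr⟩ := hhead ⟨h, by omega⟩
            injection hr with h1 h2
            exact hx h1
          · left; exact h
        have step : ((x :: rest).foldl pfBStep (p, c))
            = (rest.foldl pfBStep (p + PySem.Int.floordiv (max (c - 1) 0) 2, 0)) := by
          simp [List.foldl_cons, pfBStep, hx]
        rw [step]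
        have hrec := pfFold_eq_planted rest 0 x (by omega)
          (by constructor <;> intro h <;> [exact absurd h hx; omega])
          (by intro h; exact absurd h.2 (by omega)) (p + PySem.Int.floordiv (max (c - 1) 0) 2)
        rw [hrec]
        have h1 : ¬(prev = 0 ∧ x = 0 ∧ List.headD rest 0 = 0) := fun h => hx h.2.1
        conv_rhs => rw [pfPlanted_cons]
        rw [if_neg h1]
        have e0 : PySem.Int.floordiv (0:Int) 2 = 0 / 2 :=
          PySem.Int.floordiv_eq_ediv_of_pos (by omega)
        have e3 : PySem.Int.floordiv (max (c - 1) 0) 2 = (max (c - 1) 0) / 2 :=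
          PySem.Int.floordiv_eq_ediv_of_pos (by omega)
        rw [e0, e2, e3]
        rcases hcz with h | h <;> omega
  termination_by xs _ _ _ _ _ _ => xs.length

-- ===== VERDICT (by name: the statement is the Claim_ definition above) =====
theorem place_flowers_2_spec : Claim_equal_place_flowers_2 := by
  intro flowerbed n _
  unfold Spec_place_flowers_2
  cases flowerbed with
  | nil => simp [place_flowers_2, pfALoop, place_flowers_2_alt]
  | cons x rest =>
    rw [place_flowers_2_eq_go, pfGo_eq_planted]
    have hfold := pfFold_eq_planted (x :: rest) 1 0 (by omega)
      (by constructor <;> intro h <;> omega)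
      (by intro h; exact absurd h.1 (by omega)) 0
    simp only [place_flowers_2_alt]
    have e1 : PySem.Int.floordiv (1:Int) 2 = 1 / 2 := PySem.Int.floordiv_eq_ediv_of_pos (by omega)
    rw [e1] at hfold
    simp only [List.isEmpty_cons, Bool.not_false, Bool.true_and, ge_iff_le]
    simp only [hfold]
    rw [decide_eq_decide]
    omega
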